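-- pv_equiv track=rewrite | github.com/qingchenyouforcc/morse-structured-encoding-paper | structured_codon_codecs.py | _identifier_for_rule
-- ===== SOURCE A (Python) =====
-- def _identifier_for_rule(token: str, source_base: str, target_base: str | None) -> str:
--     changes: list[str] = []
--     for index, base in enumerate(token, start=1):
--         if base == source_base:
--             continue
--         if target_base is None:
--             return token
--         if base != target_base:
--             return token
--         changes.append(str(index))
--     return ",".join(changes)
-- ===== SOURCE B (Python) =====
-- def _identifier_for_rule(token: str, source_base: str, target_base: str | None) -> str:
--     # Pass 1: any base that is neither the source nor the target makes the rule
--     # unrepresentable -> return the token itself.  (b != None is always true,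
--     # so a None target rejects every non-source base, as intended.)
--     if any(b != source_base and b != target_base for b in token):
--         return token
--     # Pass 2: the changed positions are exactly those equal to the target.
--     changes = [str(i) for i, b in enumerate(token, 1) if b != source_base and b == target_base]
--     return ",".join(changes)
-- ===== Notes on version B (the rewrite author's own statement) =====
-- stated objective: simpler
-- what changed: Replaces the single early-returning loop that accumulates change indices with two passes: an any() guard that decides up front whether the token must be returned unchanged, then a comprehension that collects the changed positions.
import Mathlib
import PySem

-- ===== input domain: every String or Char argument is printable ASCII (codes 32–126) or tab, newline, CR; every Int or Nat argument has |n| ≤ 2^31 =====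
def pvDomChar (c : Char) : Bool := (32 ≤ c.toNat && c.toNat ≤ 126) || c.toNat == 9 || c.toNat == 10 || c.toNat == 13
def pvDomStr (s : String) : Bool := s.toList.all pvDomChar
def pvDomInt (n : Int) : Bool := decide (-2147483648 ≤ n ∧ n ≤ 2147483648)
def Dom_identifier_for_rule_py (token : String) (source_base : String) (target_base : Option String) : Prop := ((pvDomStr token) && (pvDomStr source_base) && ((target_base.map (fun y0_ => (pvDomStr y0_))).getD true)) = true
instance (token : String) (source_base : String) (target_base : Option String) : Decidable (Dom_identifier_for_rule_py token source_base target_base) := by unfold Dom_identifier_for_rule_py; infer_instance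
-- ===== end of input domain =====

-- B changes the decomposition only: a guard pass deciding whether the token is returned
-- unchanged, then a comprehension collecting the changed positions (objective: simpler).

-- ===== PORT A =====
-- the for-loop of A: state = remaining chars, 1-based index, accumulated `changes`
def identifierLoopA (token source_base : String) (target_base : Option String) :
    List Char → Int → List String → String
  | [], _, changes => PySem.Str.join "," changes
  | b :: rest, index, changes =>
    if source_base.toList == [b] then
      identifierLoopA token source_base target_base rest (index + 1) changes
    else
      match target_base with
      | none => token
      | some t =>
        if !(t.toList == [b]) then token
        else identifierLoopA token source_base target_base rest (index + 1)
               (changes ++ [PySem.Int.toStr index])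

def identifier_for_rule_py (token : String) (source_base : String) (target_base : Option String) : String :=
  identifierLoopA token source_base target_base token.toList 1 []

-- ===== PORT B =====
-- `b != source_base and b != target_base` (char vs str/None comparison, None never equal)
def pvBadB (source_base : String) (target_base : Option String) (b : Char) : Bool :=
  !(source_base.toList == [b]) &&
    (match target_base with
     | none => true
     | some t => !(t.toList == [b]))

-- `b != source_base and b == target_base`
def pvKeepB (source_base : String) (target_base : Option String) (b : Char) : Bool :=
  !(source_base.toList == [b]) &&
    (match target_base with
     | none => false
     | some t => t.toList == [b])

def identifier_for_rule_py_alt (token : String) (source_base : String) (target_base : Option String) : String :=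
  if token.toList.any (pvBadB source_base target_base) then token
  else
    PySem.Str.join ","
      (((PySem.List.enumerate token.toList 1).filter
          (fun p => pvKeepB source_base target_base p.2)).map
        (fun p => PySem.Int.toStr p.1))

-- ===== PRECONDITION & SPEC =====
def Spec_identifier_for_rule_py (token : String) (source_base : String) (target_base : Option String) (out : String) : Prop := out = identifier_for_rule_py_alt token source_base target_base
instance (token : String) (source_base : String) (target_base : Option String) (out : String) : Decidable (Spec_identifier_for_rule_py token source_base target_base out) := by unfold Spec_identifier_for_rule_py; infer_instance

-- ===== CLAIM (what is proved, stated in full; the proofs are below) =====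
def Claim_equal_identifier_for_rule_py : Prop := ∀ (token : String) (source_base : String) (target_base : Option String), Dom_identifier_for_rule_py token source_base target_base → Spec_identifier_for_rule_py token source_base target_base (identifier_for_rule_py token source_base target_base)

-- ===== LEMMAS AND PROOFS =====
-- loop invariant: A's loop equals B's guard-then-comprehension shape
lemma identifierLoopA_eq (token source_base : String) (target_base : Option String)
    (l : List Char) (i : Int) (changes : List String) :
    identifierLoopA token source_base target_base l i changes =
      if l.any (pvBadB source_base target_base) then token
      else
        PySem.Str.join ","
          (changes ++
            ((PySem.List.enumerate l i).filter
                (fun p => pvKeepB source_base target_base p.2)).map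
              (fun p => PySem.Int.toStr p.1)) := by
  induction l generalizing i changes with
  | nil => simp [identifierLoopA, PySem.List.enumerate_nil]
  | cons b rest ih =>
    simp only [identifierLoopA, List.any_cons, PySem.List.enumerate_cons, List.filter_cons]
    by_cases hs : source_base.toList == [b]
    · have hbad : pvBadB source_base target_base b = false := by
        simp [pvBadB, hs]
      have hkeep : pvKeepB source_base target_base b = false := by
        simp [pvKeepB, hs]
      simp [hs, hbad, hkeep, ih]
    · match target_base with
      | none =>
        have hbad : pvBadB source_base none b = true := by
          simp [pvBadB, hs]
        simp [hs, hbad]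
      | some t =>
        by_cases ht : t.toList == [b]
        · have hbad : pvBadB source_base (some t) b = false := by
            simp [pvBadB, ht]
          have hkeep : pvKeepB source_base (some t) b = true := by
            simp [pvKeepB, hs, ht]
          simp [hs, ht, hbad, hkeep, ih]
        · have hbad : pvBadB source_base (some t) b = true := by
            simp [pvBadB, hs, ht]
          simp [hs, ht, hbad]

-- ===== VERDICT (by name: the statement is the Claim_ definition above) =====
theorem identifier_for_rule_py_spec : Claim_equal_identifier_for_rule_py := by
  intro token source_base target_base _
  unfold Spec_identifier_for_rule_py identifier_for_rule_py identifier_for_rule_py_alt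
  rw [identifierLoopA_eq]
  simp
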